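-- pv_equiv track=rewrite | github.com/oronaminc/Programmers | [DP]카드게임.py | solution
-- ===== SOURCE A (Python) =====
-- def solution(left, right):
--     L = len(left)
--     answer = [[0] * (L+1) for i in range(L+1)]
--     for i in reversed(range(L)):
--         for j in reversed(range(L)):
--             if left[j] > right[i]: answer[i][j] = answer[i+1][j] + right[i]
--             else: answer[i][j] = max(answer[i][j+1], answer[i+1][j+1])
--     return answer[0][0]
-- ===== SOURCE B (Python) =====
-- def solution(left, right):
--     L = len(left)
--
--     # forward pass: layers[j] = reachable states (i, run-sum, blocking index) of column j
--     layers = []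
--     frontier = [0]
--     for j in range(L):
--         lv = left[j]
--         seen = set()
--         layer = []
--         nxt = []
--         for i in frontier:
--             if i == L or i in seen:
--                 continue
--             seen.add(i)
--             # collapse the run of right cards beaten by left[j] in one scan
--             s = 0
--             k = i
--             while k < L and right[k] < lv:
--                 s += right[k]
--                 k += 1
--             layer.append((i, s, k))
--             if k < L:
--                 nxt.append(k)
--                 nxt.append(k + 1)
--         layers.append(layer)
--         frontier = nxt
--
--     # backward pass: evaluate the DP recurrence on the reachable states only
--     values = {}
--     for layer in reversed(layers):
--         cur = {}
--         for (i, s, k) in layer: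
--             cur[i] = s + max(values.get(k, 0), values.get(k + 1, 0))
--         values = cur
--     return values.get(0, 0)
-- ===== Notes on version B (the rewrite author's own statement) =====
-- stated objective: alternative
-- what changed: B abandons A's dense (L+1)x(L+1) table fill: a forward pass collapses each maximal run of takeable right cards in one scan and computes only the DP states reachable from (0,0) layer by layer, then a backward pass evaluates the recurrence on those sparse reachable states via per-layer dictionaries.
import Mathlib
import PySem

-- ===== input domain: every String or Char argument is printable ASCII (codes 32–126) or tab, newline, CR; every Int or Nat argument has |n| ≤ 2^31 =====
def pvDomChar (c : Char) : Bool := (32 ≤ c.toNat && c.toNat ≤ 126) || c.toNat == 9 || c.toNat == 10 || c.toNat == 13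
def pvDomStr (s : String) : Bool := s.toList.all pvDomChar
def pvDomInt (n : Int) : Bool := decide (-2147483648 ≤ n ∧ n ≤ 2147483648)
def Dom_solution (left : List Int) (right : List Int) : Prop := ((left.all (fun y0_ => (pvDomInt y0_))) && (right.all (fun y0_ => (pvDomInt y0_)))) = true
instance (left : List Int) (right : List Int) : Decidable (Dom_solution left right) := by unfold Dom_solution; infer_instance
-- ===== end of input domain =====

-- B replaces A's dense (L+1)×(L+1) bottom-up table by a forward reachability pass (collapsing
-- each run of takeable right cards in one scan) plus a backward evaluation of the recurrence on
-- the reachable states only. (objective: alternative)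

-- ===== PORT A =====
-- one inner-loop body assignment answer[i][j] = …
def pvCellA (left : List Int) (right : List Int) (i : Nat) (ans : List (List Int)) (j : Nat) : List (List Int) :=
  ans.set i ((ans.getD i []).set j
    (if PySem.List.pyGetD left (j : Int) 0 > PySem.List.pyGetD right (i : Int) 0 then
       (ans.getD (i+1) []).getD j 0 + PySem.List.pyGetD right (i : Int) 0
     else
       max ((ans.getD i []).getD (j+1) 0) ((ans.getD (i+1) []).getD (j+1) 0)))

-- one outer-loop iteration: for j in reversed(range(L)): …
def pvRowA (left : List Int) (right : List Int) (ans : List (List Int)) (i : Nat) : List (List Int) :=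
  (List.range left.length).reverse.foldl (pvCellA left right i) ans

def solution (left : List Int) (right : List Int) : Int :=
  let L := left.length
  let answer : List (List Int) := (List.range (L+1)).map (fun _ => List.replicate (L+1) (0 : Int))
  let answer := (List.range L).reverse.foldl (pvRowA left right) answer
  (answer.getD 0 []).getD 0 0

-- ===== PORT B =====
-- run(i, j): while i < L and right[i] < left[j]: s += right[i]; i += 1; returns (s, i)
def pvRunB (left : List Int) (right : List Int) (j : Nat) (s : Int) (i : Nat) : Int × Nat :=
  if h : i < left.length ∧ PySem.List.pyGetD right (i : Int) 0 < PySem.List.pyGetD left (j : Int) 0 then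
    pvRunB left right j (s + PySem.List.pyGetD right (i : Int) 0) (i + 1)
  else (s, i)
termination_by left.length - i
decreasing_by omega

-- one iteration of the forward pass's inner loop over the frontier (state = (layer, seen, nxt))
def pvStepB (left : List Int) (right : List Int) (j : Nat)
    (st : List (Nat × Int × Nat) × PySem.Set Nat × List Nat) (i : Nat) :
    List (Nat × Int × Nat) × PySem.Set Nat × List Nat :=
  if i = left.length ∨ PySem.Set.contains st.2.1 i = true then st
  else
    let sk := pvRunB left right j 0 i
    (st.1 ++ [(i, sk.1, sk.2)], PySem.Set.add st.2.1 i,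
     if sk.2 < left.length then st.2.2 ++ [sk.2, sk.2 + 1] else st.2.2)

-- forward pass: layers[j] = reachable states (i, run-sum, blocking index) of column j
def pvForwardB (left : List Int) (right : List Int) : List (List (Nat × Int × Nat)) :=
  ((List.range left.length).foldl
    (fun st j =>
      let r := st.2.foldl (pvStepB left right j) ([], PySem.Set.empty, [])
      (st.1 ++ [r.1], r.2.2))
    (([] : List (List (Nat × Int × Nat))), [0])).1

-- one backward-pass assignment cur[i] = s + max(values.get(k, 0), values.get(k+1, 0))
def pvBackStep (values : PySem.Dict Nat Int) (cur : PySem.Dict Nat Int) (t : Nat × Int × Nat) :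
    PySem.Dict Nat Int :=
  cur.insert t.1 (t.2.1 + max (values.getD t.2.2 0) (values.getD (t.2.2 + 1) 0))

def solution_alt (left : List Int) (right : List Int) : Int :=
  ((pvForwardB left right).reverse.foldl
      (fun values layer => layer.foldl (pvBackStep values) PySem.Dict.empty)
      PySem.Dict.empty).getD 0 0

-- ===== PRECONDITION & SPEC =====
-- Pre_ excludes exactly the inputs on which Python A raises IndexError: right shorter than left
-- (A reads right[i] for every i < len(left)).
def Pre_solution (left : List Int) (right : List Int) : Prop := left.length ≤ right.length
instance (left : List Int) (right : List Int) : Decidable (Pre_solution left right) := by unfold Pre_solution; infer_instance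
def pvWitness_solution : List Int × List Int := ([3, 1], [2, 5])

def Spec_solution (left : List Int) (right : List Int) (out : Int) : Prop := out = solution_alt left right
instance (left : List Int) (right : List Int) (out : Int) : Decidable (Spec_solution left right out) := by unfold Spec_solution; infer_instance

-- ===== CLAIM (what is proved, stated in full; the proofs are below) =====
def Claim_equal_solution : Prop := ∀ (left : List Int) (right : List Int), Dom_solution left right → Pre_solution left right → Spec_solution left right (solution left right)

-- ===== LEMMAS AND PROOFS =====

-- the DP value answer[i][j] both programs compute
def pvF (left : List Int) (right : List Int) (i j : Nat) : Int :=
  if _h : i < left.length ∧ j < left.length then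
    if PySem.List.pyGetD left (j : Int) 0 > PySem.List.pyGetD right (i : Int) 0 then
      pvF left right (i+1) j + PySem.List.pyGetD right (i : Int) 0
    else
      max (pvF left right i (j+1)) (pvF left right (i+1) (j+1))
  else 0
termination_by (left.length - i) + (left.length - j)
decreasing_by all_goals omega

lemma pvF_base {left right : List Int} {i j : Nat} (h : ¬ (i < left.length ∧ j < left.length)) :
    pvF left right i j = 0 := by
  rw [pvF]; simp [h]

-- basic getD/set facts
lemma pv_getD_set_self {α : Type} [Inhabited α] (l : List α) (n : Nat) (a d : α) (h : n < l.length) :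
    (l.set n a).getD n d = a := by
  simp [List.getD_eq_getElem?_getD, h]

lemma pv_getD_set_ne {α : Type} [Inhabited α] (l : List α) (n m : Nat) (a d : α) (h : n ≠ m) :
    (l.set n a).getD m d = l.getD m d := by
  simp [List.getD_eq_getElem?_getD, List.getElem?_set_ne h]

lemma pv_getD_replicate_zero (m n : Nat) : (List.replicate m (0 : Int)).getD n 0 = 0 := by
  by_cases h : n < m
  · simp [List.getD_eq_getElem?_getD, h]
  · rw [List.getD_eq_getElem?_getD, List.getElem?_eq_none (by simpa using Nat.le_of_not_lt h)]; rfl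

-- ===== B-side =====

-- the run-collapse: one maximal run of takeable right cards equals the chain of forced DP steps
lemma pvRunB_spec (left right : List Int) (j : Nat) (hj : j < left.length) :
    ∀ (n i : Nat) (s : Int), left.length - i ≤ n → i ≤ left.length →
      i ≤ (pvRunB left right j s i).2 ∧ (pvRunB left right j s i).2 ≤ left.length ∧
      s + pvF left right i j =
        (pvRunB left right j s i).1 +
          max (pvF left right (pvRunB left right j s i).2 (j+1))
              (pvF left right ((pvRunB left right j s i).2 + 1) (j+1)) := by
  intro n
  induction n with
  | zero =>
    intro i s hn hi
    have hiL : i = left.length := by omega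
    rw [pvRunB]
    have hng : ¬ (i < left.length ∧ PySem.List.pyGetD right (i : Int) 0 < PySem.List.pyGetD left (j : Int) 0) := by
      intro h; omega
    rw [dif_neg hng]
    refine ⟨le_refl _, by omega, ?_⟩
    rw [pvF_base (by omega), pvF_base (by omega), pvF_base (by omega)]
    simp
  | succ n ih =>
    intro i s hn hi
    rw [pvRunB]
    by_cases h : i < left.length ∧ PySem.List.pyGetD right (i : Int) 0 < PySem.List.pyGetD left (j : Int) 0
    · rw [dif_pos h]
      obtain ⟨h1, h2, h3⟩ := ih (i+1) (s + PySem.List.pyGetD right (i : Int) 0) (by omega) (by omega)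
      refine ⟨by omega, h2, ?_⟩
      have hF : pvF left right i j = pvF left right (i+1) j + PySem.List.pyGetD right (i : Int) 0 := by
        rw [pvF, dif_pos ⟨h.1, hj⟩, if_pos h.2]
      rw [hF]
      calc s + (pvF left right (i+1) j + PySem.List.pyGetD right (i : Int) 0)
          = (s + PySem.List.pyGetD right (i : Int) 0) + pvF left right (i+1) j := by ring
        _ = _ := h3
    · rw [dif_neg h]
      refine ⟨le_refl _, hi, ?_⟩
      by_cases hiL : i < left.length
      · have hc : ¬ PySem.List.pyGetD left (j : Int) 0 > PySem.List.pyGetD right (i : Int) 0 := by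
          intro hc; exact h ⟨hiL, hc⟩
        rw [pvF, dif_pos ⟨hiL, hj⟩, if_neg hc]
      · rw [pvF_base (by omega), pvF_base (by omega), pvF_base (by omega)]
        simp

-- forward-pass bookkeeping (proof-side names for the port's folds)
def pvScan (left right : List Int) (j : Nat) (fr : List Nat) :
    List (Nat × Int × Nat) × PySem.Set Nat × List Nat :=
  fr.foldl (pvStepB left right j) ([], PySem.Set.empty, [])

def pvFrontier (left right : List Int) : Nat → List Nat
  | 0 => [0]
  | j + 1 => (pvScan left right j (pvFrontier left right j)).2.2

def pvLayer (left right : List Int) (j : Nat) : List (Nat × Int × Nat) :=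
  (pvScan left right j (pvFrontier left right j)).1

-- the forward fold produces exactly these layers and frontiers
lemma pvForward_fold (left right : List Int) : ∀ (m : Nat),
    (List.range m).foldl
      (fun st j =>
        let r := st.2.foldl (pvStepB left right j) ([], PySem.Set.empty, [])
        (st.1 ++ [r.1], r.2.2))
      (([] : List (List (Nat × Int × Nat))), [0]) =
    ((List.range m).map (pvLayer left right), pvFrontier left right m) := by
  intro m
  induction m with
  | zero => simp [pvFrontier]
  | succ m ih =>
    rw [List.range_succ, List.foldl_append, ih, List.foldl_cons, List.foldl_nil]
    simp [pvLayer, pvScan, pvFrontier, List.range_succ]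

lemma pvForwardB_eq (left right : List Int) :
    pvForwardB left right = (List.range left.length).map (pvLayer left right) := by
  unfold pvForwardB
  rw [pvForward_fold]

-- invariant of the inner forward scan
def pvInvS (left right : List Int) (j : Nat)
    (st : List (Nat × Int × Nat) × PySem.Set Nat × List Nat) : Prop :=
  (∀ t ∈ st.1, t.2 = pvRunB left right j 0 t.1 ∧ t.1 < left.length ∧
      (t.2.2 < left.length → t.2.2 ∈ st.2.2 ∧ t.2.2 + 1 ∈ st.2.2)) ∧
  (∀ x : Nat, x ∈ st.2.1 → ∃ p, (x, p) ∈ st.1) ∧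
  (∀ x ∈ st.2.2, x ≤ left.length)

lemma pvScan_inv (left right : List Int) (j : Nat) (hj : j < left.length) :
    ∀ (fr : List Nat), (∀ x ∈ fr, x ≤ left.length) →
    ∀ st, pvInvS left right j st →
      pvInvS left right j (fr.foldl (pvStepB left right j) st) ∧
      (∀ x : Nat, x ∈ st.2.1 → x ∈ (fr.foldl (pvStepB left right j) st).2.1) ∧
      (∀ x ∈ fr, x ≠ left.length → x ∈ (fr.foldl (pvStepB left right j) st).2.1) := by
  intro fr
  induction fr with
  | nil => intro _ st hst; exact ⟨hst, fun x hx => hx, fun x hx => absurd hx (List.not_mem_nil)⟩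
  | cons a fr ih =>
    intro hfr st hst
    rw [List.foldl_cons]
    have haL : a ≤ left.length := hfr a (List.mem_cons_self)
    -- analyse one step
    by_cases hg : a = left.length ∨ PySem.Set.contains st.2.1 a = true
    · have hstep : pvStepB left right j st a = st := by
        unfold pvStepB; rw [if_pos hg]
      rw [hstep]
      obtain ⟨h1, h2, h3⟩ := ih (fun x hx => hfr x (List.mem_cons_of_mem _ hx)) st hst
      refine ⟨h1, h2, ?_⟩
      intro x hx hxL
      rcases List.mem_cons.mp hx with rfl | hx'
      · rcases hg with rfl | hc
        · exact absurd rfl hxL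
        · exact h2 x ((PySem.Set.contains_iff _ _).mp hc)
      · exact h3 x hx' hxL
    · push_neg at hg
      obtain ⟨hgL, hgc⟩ := hg
      have haLt : a < left.length := by omega
      set sk := pvRunB left right j 0 a with hsk
      have hrun := pvRunB_spec left right j hj (left.length - a) a 0 (le_refl _) haL
      have hstep : pvStepB left right j st a =
          (st.1 ++ [(a, sk.1, sk.2)], PySem.Set.add st.2.1 a,
           if sk.2 < left.length then st.2.2 ++ [sk.2, sk.2 + 1] else st.2.2) := by
        unfold pvStepB
        rw [if_neg (by push_neg; exact ⟨hgL, by simpa using hgc⟩)]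
      rw [hstep]
      obtain ⟨i1, i2, i3⟩ := hst
      have hst' : pvInvS left right j
          (st.1 ++ [(a, sk.1, sk.2)], PySem.Set.add st.2.1 a,
           if sk.2 < left.length then st.2.2 ++ [sk.2, sk.2 + 1] else st.2.2) := by
        refine ⟨?_, ?_, ?_⟩
        · intro t ht
          rcases List.mem_append.mp ht with ht' | ht'
          · obtain ⟨e1, e2, e3⟩ := i1 t ht'
            refine ⟨e1, e2, fun hk => ?_⟩
            obtain ⟨c1, c2⟩ := e3 hk
            constructor <;> [skip; skip] <;>
              · split
                · exact List.mem_append.mpr (Or.inl (by assumption))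
                · assumption
          · have ht'' : t = (a, sk.1, sk.2) := by simpa using ht'
            subst ht''
            refine ⟨rfl, haLt, fun hk => ?_⟩
            simp only
            rw [if_pos hk]
            exact ⟨List.mem_append.mpr (Or.inr (by simp)),
                   List.mem_append.mpr (Or.inr (by simp))⟩
        · intro x hx
          rcases (PySem.Set.mem_add _ _ _).mp hx with hx' | rfl
          · obtain ⟨p, hp⟩ := i2 x hx'
            exact ⟨p, List.mem_append.mpr (Or.inl hp)⟩
          · exact ⟨(sk.1, sk.2), List.mem_append.mpr (Or.inr (by simp))⟩
        · intro x hx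
          by_cases hk : sk.2 < left.length
          · rw [if_pos hk] at hx
            rcases List.mem_append.mp hx with hx' | hx'
            · exact i3 x hx'
            · rcases (by simpa using hx' : x = sk.2 ∨ x = sk.2 + 1) with rfl | rfl
              · omega
              · omega
          · rw [if_neg hk] at hx
            exact i3 x hx
      obtain ⟨h1, h2, h3⟩ := ih (fun x hx => hfr x (List.mem_cons_of_mem _ hx)) _ hst'
      refine ⟨h1, ?_, ?_⟩
      · intro x hx
        exact h2 x ((PySem.Set.mem_add _ _ _).mpr (Or.inl hx))
      · intro x hx hxL
        rcases List.mem_cons.mp hx with rfl | hx'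
        · exact h2 x ((PySem.Set.mem_add _ _ _).mpr (Or.inr rfl))
        · exact h3 x hx' hxL

lemma pvInvS_empty (left right : List Int) (j : Nat) :
    pvInvS left right j ([], PySem.Set.empty, []) := by
  refine ⟨?_, ?_, ?_⟩
  · intro t ht; exact absurd ht List.not_mem_nil
  · intro x hx; exact absurd hx List.not_mem_nil
  · intro x hx; exact absurd hx List.not_mem_nil

lemma pvFrontier_le (left right : List Int) :
    ∀ j, j ≤ left.length → ∀ x ∈ pvFrontier left right j, x ≤ left.length := by
  intro j
  induction j with
  | zero =>
    intro _ x hx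
    have : x = 0 := by simpa [pvFrontier] using hx
    omega
  | succ j ih =>
    intro hj x hx
    have hjL : j < left.length := hj
    have h := pvScan_inv left right j hjL (pvFrontier left right j) (ih (by omega))
        ([], PySem.Set.empty, []) (pvInvS_empty left right j)
    exact h.1.2.2 x hx

-- layer facts: entries are run-values of frontier states, children lie in the next frontier,
-- and every non-terminal frontier state has an entry
lemma pvLayer_spec (left right : List Int) (j : Nat) (hj : j < left.length) :
    (∀ t ∈ pvLayer left right j, t.2 = pvRunB left right j 0 t.1 ∧ t.1 < left.length ∧
        (t.2.2 < left.length →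
          t.2.2 ∈ pvFrontier left right (j+1) ∧ t.2.2 + 1 ∈ pvFrontier left right (j+1))) ∧
    (∀ x ∈ pvFrontier left right j, x ≠ left.length → ∃ p, (x, p) ∈ pvLayer left right j) := by
  have h := pvScan_inv left right j hj (pvFrontier left right j)
      (pvFrontier_le left right j (by omega)) ([], PySem.Set.empty, []) (pvInvS_empty left right j)
  constructor
  · intro t ht
    exact h.1.1 t ht
  · intro x hx hxL
    exact h.1.2.1 x (h.2.2 x hx hxL)

-- backward pass, one column at a time (proof-side name)
def pvVals (left right : List Int) (m : Nat) : PySem.Dict Nat Int :=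
  if _h : m < left.length then
    (pvLayer left right m).foldl (pvBackStep (pvVals left right (m+1))) PySem.Dict.empty
  else PySem.Dict.empty
termination_by left.length - m

lemma pvVals_of_lt {left right : List Int} {m : Nat} (h : m < left.length) :
    pvVals left right m =
      (pvLayer left right m).foldl (pvBackStep (pvVals left right (m+1))) PySem.Dict.empty := by
  rw [pvVals, dif_pos h]

lemma pvVals_of_ge {left right : List Int} {m : Nat} (h : ¬ m < left.length) :
    pvVals left right m = PySem.Dict.empty := by
  rw [pvVals, dif_neg h]

lemma pvBack_fold (left right : List Int) : ∀ (c m : Nat), m + c = left.length →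
    ((List.range' m c).map (pvLayer left right)).reverse.foldl
      (fun values layer => layer.foldl (pvBackStep values) PySem.Dict.empty)
      PySem.Dict.empty = pvVals left right m := by
  intro c
  induction c with
  | zero =>
    intro m hm
    rw [pvVals_of_ge (show ¬ m < left.length by omega)]
    simp
  | succ c ih =>
    intro m hm
    rw [List.range'_succ, List.map_cons, List.reverse_cons, List.foldl_append, ih (m+1) (by omega),
        List.foldl_cons, List.foldl_nil, pvVals_of_lt (show m < left.length by omega)]

-- the per-key value the backward fold assigns
def pvValOf (values : PySem.Dict Nat Int) (t : Nat × Int × Nat) : Int :=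
  t.2.1 + max (values.getD t.2.2 0) (values.getD (t.2.2 + 1) 0)

lemma pvBack_getD_not_mem (values : PySem.Dict Nat Int) (x : Nat) :
    ∀ (layer : List (Nat × Int × Nat)) (cur : PySem.Dict Nat Int),
      (∀ t ∈ layer, t.1 ≠ x) →
      (layer.foldl (pvBackStep values) cur).getD x 0 = cur.getD x 0 := by
  intro layer
  induction layer with
  | nil => intro cur _; rfl
  | cons t layer ih =>
    intro cur h
    rw [List.foldl_cons, ih _ (fun u hu => h u (List.mem_cons_of_mem _ hu))]
    unfold pvBackStep
    rw [PySem.Dict.getD_insert_of_ne _ _ _ (fun he => h t List.mem_cons_self he.symm)]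

lemma pvBack_getD_mem (values : PySem.Dict Nat Int) (x : Nat) (v : Int) :
    ∀ (layer : List (Nat × Int × Nat)) (cur : PySem.Dict Nat Int),
      (∃ t ∈ layer, t.1 = x) →
      (∀ t ∈ layer, t.1 = x → pvValOf values t = v) →
      (layer.foldl (pvBackStep values) cur).getD x 0 = v := by
  intro layer
  induction layer with
  | nil => intro cur hex _; obtain ⟨t, ht, _⟩ := hex; exact absurd ht List.not_mem_nil
  | cons t layer ih =>
    intro cur hex hall
    rw [List.foldl_cons]
    by_cases hrest : ∃ u ∈ layer, u.1 = x
    · exact ih _ hrest (fun u hu => hall u (List.mem_cons_of_mem _ hu))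
    · push_neg at hrest
      have htx : t.1 = x := by
        obtain ⟨u, hu, hux⟩ := hex
        rcases List.mem_cons.mp hu with rfl | hu'
        · exact hux
        · exact absurd hux (hrest u hu')
      rw [pvBack_getD_not_mem values x layer _ hrest]
      unfold pvBackStep
      rw [htx, PySem.Dict.getD_insert_self]
      have := hall t List.mem_cons_self htx
      unfold pvValOf at this
      exact this

lemma pvVals_spec (left right : List Int) :
    ∀ (n m : Nat), left.length - m ≤ n →
      (∀ x ∈ pvFrontier left right m, (pvVals left right m).getD x 0 = pvF left right x m) ∧
      (∀ x : Nat, left.length ≤ x → (pvVals left right m).getD x 0 = 0) := by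
  intro n
  induction n with
  | zero =>
    intro m hm
    rw [pvVals, dif_neg (by omega)]
    constructor
    · intro x _
      rw [pvF_base (by omega)]
      rfl
    · intro x _; rfl
  | succ n ih =>
    intro m hm
    by_cases hmL : m < left.length
    · obtain ⟨ihF, ihZ⟩ := ih (m+1) (by omega)
      obtain ⟨hL1, hL2⟩ := pvLayer_spec left right m hmL
      rw [pvVals, dif_pos hmL]
      have hnotmemL : ∀ (x : Nat), left.length ≤ x → ∀ t ∈ pvLayer left right m, t.1 ≠ x := by
        intro x hx t ht he
        have := (hL1 t ht).2.1
        omega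
      constructor
      · intro x hx
        by_cases hxL : x = left.length
        · subst hxL
          rw [pvBack_getD_not_mem _ _ _ _ (hnotmemL _ (le_refl _)), pvF_base (by omega)]
          rfl
        · obtain ⟨p, hp⟩ := hL2 x hx hxL
          obtain ⟨e1, e2, e3⟩ := hL1 (x, p) hp
          have e1' : p = pvRunB left right m 0 x := e1
          subst e1'
          have hxLt : x < left.length := e2
          have hlook : (pvVals left right (m+1)).getD (pvRunB left right m 0 x).2 0 =
                pvF left right (pvRunB left right m 0 x).2 (m+1) ∧
              (pvVals left right (m+1)).getD ((pvRunB left right m 0 x).2+1) 0 =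
                pvF left right ((pvRunB left right m 0 x).2+1) (m+1) := by
            by_cases hk : (pvRunB left right m 0 x).2 < left.length
            · obtain ⟨c1, c2⟩ := e3 hk
              exact ⟨ihF _ c1, ihF _ c2⟩
            · have hkL : left.length ≤ (pvRunB left right m 0 x).2 := by omega
              rw [ihZ _ hkL, ihZ _ (by omega), pvF_base (by omega), pvF_base (by omega)]
              exact ⟨rfl, rfl⟩
          have hval : ∀ t ∈ pvLayer left right m, t.1 = x →
              pvValOf (pvVals left right (m+1)) t = pvF left right x m := by
            intro t ht htx
            obtain ⟨f1, _, _⟩ := hL1 t ht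
            unfold pvValOf
            rw [f1, htx]
            obtain ⟨r1, r2, r3⟩ := pvRunB_spec left right m hmL (left.length - x) x 0 (le_refl _) (by omega)
            rw [hlook.1, hlook.2]
            omega
          exact pvBack_getD_mem _ x _ _ _ ⟨(x, pvRunB left right m 0 x), hp, rfl⟩ hval
      · intro x hx
        rw [pvBack_getD_not_mem _ _ _ _ (hnotmemL x hx)]
        rfl
    · rw [pvVals, dif_neg hmL]
      constructor
      · intro x _
        rw [pvF_base (by omega)]
        rfl
      · intro x _; rfl

lemma solution_alt_eq (left right : List Int) :
    solution_alt left right = pvF left right 0 0 := by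
  unfold solution_alt
  rw [pvForwardB_eq]
  have hr : List.range left.length = List.range' 0 left.length := by
    rw [List.range_eq_range']
  rw [hr, pvBack_fold left right left.length 0 (by omega)]
  by_cases hL : 0 < left.length
  · exact (pvVals_spec left right left.length 0 (by omega)).1 0 (by simp [pvFrontier])
  · rw [pvVals, dif_neg (by omega), pvF_base (by omega)]
    rfl

-- ===== A-side =====

lemma pv_getD_map_range (n r : Nat) (f : Nat → List Int) (h : r < n) :
    ((List.range n).map f).getD r [] = f r := by
  simp [List.getD_eq_getElem?_getD, h]

lemma pvRowA_inner (left right : List Int) (i : Nat) (hi : i < left.length) :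
    ∀ (k : Nat), k ≤ left.length → ∀ (ans : List (List Int)),
      ans.length = left.length + 1 →
      (ans.getD i []).length = left.length + 1 →
      (∀ j', j' ≤ left.length → ((ans.getD (i+1) []).getD j' 0) = pvF left right (i+1) j') →
      (∀ j', k ≤ j' → j' ≤ left.length → ((ans.getD i []).getD j' 0) = pvF left right i j') →
      (((List.range k).reverse.foldl (pvCellA left right i) ans).length = left.length + 1) ∧
      (∀ r, r ≠ i → ((List.range k).reverse.foldl (pvCellA left right i) ans).getD r [] = ans.getD r []) ∧
      ((((List.range k).reverse.foldl (pvCellA left right i) ans).getD i []).length = left.length + 1) ∧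
      (∀ j', j' ≤ left.length →
        ((((List.range k).reverse.foldl (pvCellA left right i) ans).getD i []).getD j' 0) = pvF left right i j') := by
  intro k
  induction k with
  | zero =>
    intro _ ans hlen hrowlen hbelow hrow
    exact ⟨by simpa using hlen, fun r _ => by simp, by simpa using hrowlen,
      fun j' hj' => by simpa using hrow j' (Nat.zero_le _) hj'⟩
  | succ k ih =>
    intro hk ans hlen hrowlen hbelow hrow
    have hkL : k < left.length := hk
    have hstep : (List.range (k+1)).reverse = k :: (List.range k).reverse := by
      simp [List.range_succ]
    rw [hstep, List.foldl_cons]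
    have hiLen : i < ans.length := by omega
    have hrow_eq : (pvCellA left right i ans k).getD i [] = (ans.getD i []).set k
        (if PySem.List.pyGetD left (k : Int) 0 > PySem.List.pyGetD right (i : Int) 0 then
           (ans.getD (i+1) []).getD k 0 + PySem.List.pyGetD right (i : Int) 0
         else
           max ((ans.getD i []).getD (k+1) 0) ((ans.getD (i+1) []).getD (k+1) 0)) := by
      unfold pvCellA
      exact pv_getD_set_self _ _ _ _ hiLen
    have hother : ∀ r, r ≠ i → (pvCellA left right i ans k).getD r [] = ans.getD r [] := by
      intro r hr
      unfold pvCellA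
      exact pv_getD_set_ne _ _ _ _ _ (fun h => hr h.symm)
    have hlen' : (pvCellA left right i ans k).length = left.length + 1 := by
      unfold pvCellA; simpa using hlen
    have hrowlen' : ((pvCellA left right i ans k).getD i []).length = left.length + 1 := by
      rw [hrow_eq]; simpa using hrowlen
    have hbelow' : ∀ j', j' ≤ left.length →
        (((pvCellA left right i ans k).getD (i+1) []).getD j' 0) = pvF left right (i+1) j' := by
      intro j' hj'
      rw [hother (i+1) (by omega)]
      exact hbelow j' hj'
    have hrow' : ∀ j', k ≤ j' → j' ≤ left.length →
        (((pvCellA left right i ans k).getD i []).getD j' 0) = pvF left right i j' := by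
      intro j' hkj hj'
      rw [hrow_eq]
      by_cases hjk : j' = k
      · subst hjk
        rw [pv_getD_set_self _ _ _ _ (by omega)]
        rw [pvF, dif_pos (⟨hi, hkL⟩ : i < left.length ∧ j' < left.length)]
        split_ifs with hc
        · rw [hbelow j' (by omega)]
        · rw [hrow (j'+1) (by omega) (by omega), hbelow (j'+1) (by omega)]
      · rw [pv_getD_set_ne _ _ _ _ _ (fun h => hjk h.symm)]
        exact hrow j' (by omega) hj'
    obtain ⟨c1, c2, c3, c4⟩ := ih (Nat.le_of_lt hkL) _ hlen' hrowlen' hbelow' hrow'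
    exact ⟨c1, fun r hr => by rw [c2 r hr, hother r hr], c3, c4⟩

lemma pvRowA_outer (left right : List Int) :
    ∀ (k : Nat), k ≤ left.length → ∀ (ans : List (List Int)),
      ans.length = left.length + 1 →
      (∀ r, r ≤ left.length → (ans.getD r []).length = left.length + 1) →
      (∀ r, k ≤ r → r ≤ left.length → ∀ j', j' ≤ left.length →
        ((ans.getD r []).getD j' 0) = pvF left right r j') →
      (∀ r, r < k → ∀ j', ((ans.getD r []).getD j' 0) = 0) →
      ∀ r, r ≤ left.length → ∀ j', j' ≤ left.length →
        ((((List.range k).reverse.foldl (pvRowA left right) ans).getD r []).getD j' 0) = pvF left right r j' := by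
  intro k
  induction k with
  | zero =>
    intro _ ans _ _ hcorr _ r hr j' hj'
    simpa using hcorr r (Nat.zero_le _) hr j' hj'
  | succ k ih =>
    intro hk ans hlen hrowlen hcorr hzero
    have hkL : k < left.length := hk
    have hstep : (List.range (k+1)).reverse = k :: (List.range k).reverse := by
      simp [List.range_succ]
    rw [hstep, List.foldl_cons]
    obtain ⟨c1, c2, c3, c4⟩ := pvRowA_inner left right k hkL left.length (le_refl _) ans
      hlen (hrowlen k (by omega))
      (fun j' hj' => hcorr (k+1) (by omega) (by omega) j' hj')
      (fun j' h1 h2 => by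
        have : j' = left.length := le_antisymm h2 h1
        subst this
        rw [hzero k (by omega), pvF_base (by omega)])
    rw [show pvRowA left right ans k = (List.range left.length).reverse.foldl (pvCellA left right k) ans from rfl]
    refine ih (Nat.le_of_lt hkL) _ c1 ?_ ?_ ?_
    · intro r hr
      by_cases hrk : r = k
      · subst hrk; exact c3
      · rw [c2 r hrk]; exact hrowlen r hr
    · intro r hkr hr j' hj'
      by_cases hrk : r = k
      · subst hrk; exact c4 j' hj'
      · rw [c2 r hrk]; exact hcorr r (by omega) hr j' hj'
    · intro r hr j'
      rw [c2 r (by omega)]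
      exact hzero r (by omega) j'

lemma solution_eq (left right : List Int) :
    solution left right = pvF left right 0 0 := by
  unfold solution
  refine pvRowA_outer left right left.length (le_refl _) _ (by simp) ?_ ?_ ?_ 0 (Nat.zero_le _) 0 (Nat.zero_le _)
  · intro r hr
    rw [pv_getD_map_range _ _ _ (by omega)]
    simp
  · intro r h1 h2 j' hj'
    have : r = left.length := le_antisymm h2 h1
    subst this
    rw [pv_getD_map_range _ _ _ (by omega), pv_getD_replicate_zero, pvF_base (by omega)]
  · intro r hr j'
    rw [pv_getD_map_range _ _ _ (by omega), pv_getD_replicate_zero]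

-- ===== VERDICT (by name: the statement is the Claim_ definition above) =====
theorem solution_spec : Claim_equal_solution := by
  intro left right _ _
  unfold Spec_solution
  rw [solution_eq, solution_alt_eq]
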